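-- pv_equiv track=rewrite | github.com/cfpark00/world-map-representation | src/analysis/plot_cka_matrix_all.py | get_non_overlapping_pairs
-- ===== SOURCE A (Python) =====
-- def get_non_overlapping_pairs(prefix):
--     """
--     Get pairs of experiments that don't share any training data.
--     Returns a set of (i, j) tuples where i and j are 1-indexed experiment numbers.
--     """
--     # Define which datasets each experiment contains
--     dataset_mappings = {
--         'pt2': {
--             1: {'distance', 'trianglearea'},
--             2: {'angle', 'compass'},
--             3: {'inside', 'perimeter'},
--             4: {'crossing', 'distance'},
--             5: {'trianglearea', 'angle'},
--             6: {'compass', 'inside'},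
--             7: {'perimeter', 'crossing'},
--             8: {'distance', 'angle'}
--         },
--         'pt3': {
--             1: {'distance', 'trianglearea', 'angle'},
--             2: {'compass', 'inside', 'perimeter'},
--             3: {'crossing', 'distance', 'trianglearea'},
--             4: {'angle', 'compass', 'inside'},
--             5: {'perimeter', 'crossing', 'distance'},
--             6: {'trianglearea', 'angle', 'compass'},
--             7: {'inside', 'perimeter', 'crossing'},
--             8: {'distance', 'trianglearea', 'angle'}
--         }
--     }
--
--     if prefix not in dataset_mappings:
--         return set()
--
--     datasets = dataset_mappings[prefix]
--     non_overlap_pairs = set()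
--
--     for i in range(1, len(datasets) + 1):
--         for j in range(i + 1, len(datasets) + 1):
--             # Check if they share any datasets
--             shared = datasets[i] & datasets[j]
--             if not shared:
--                 non_overlap_pairs.add((i, j))
--
--     return non_overlap_pairs
-- ===== SOURCE B (Python) =====
-- def get_non_overlapping_pairs(prefix):
--     """
--     Get pairs of experiments that don't share any training data.
--     Returns a set of (i, j) tuples where i and j are 1-indexed experiment numbers.
--     """
--     dataset_mappings = {
--         'pt2': {
--             1: {'distance', 'trianglearea'},
--             2: {'angle', 'compass'},
--             3: {'inside', 'perimeter'},
--             4: {'crossing', 'distance'},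
--             5: {'trianglearea', 'angle'},
--             6: {'compass', 'inside'},
--             7: {'perimeter', 'crossing'},
--             8: {'distance', 'angle'}
--         },
--         'pt3': {
--             1: {'distance', 'trianglearea', 'angle'},
--             2: {'compass', 'inside', 'perimeter'},
--             3: {'crossing', 'distance', 'trianglearea'},
--             4: {'angle', 'compass', 'inside'},
--             5: {'perimeter', 'crossing', 'distance'},
--             6: {'trianglearea', 'angle', 'compass'},
--             7: {'inside', 'perimeter', 'crossing'},
--             8: {'distance', 'trianglearea', 'angle'}
--         }
--     }
--
--     if prefix not in dataset_mappings:
--         return set()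
--
--     datasets = dataset_mappings[prefix]
--
--     # Inverted index: dataset name -> experiments containing it (ascending).
--     index = {}
--     for i, ds in datasets.items():
--         for name in ds:
--             index.setdefault(name, []).append(i)
--
--     # Every pair of experiments sharing some dataset.
--     overlapping = set()
--     for exps in index.values():
--         for a in range(len(exps)):
--             for b in range(a + 1, len(exps)):
--                 overlapping.add((exps[a], exps[b]))
--
--     n = len(datasets)
--     all_pairs = {(i, j) for i in range(1, n + 1) for j in range(i + 1, n + 1)}
--     return all_pairs - overlapping
-- ===== Notes on version B (the rewrite author's own statement) =====
-- stated objective: alternative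
-- what changed: Replaces the nested pairwise set-intersection loops by an inverted index (dataset name -> experiments containing it), collects the overlapping pairs from each index bucket, and returns the all-pairs set minus the overlapping set.
import Mathlib
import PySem

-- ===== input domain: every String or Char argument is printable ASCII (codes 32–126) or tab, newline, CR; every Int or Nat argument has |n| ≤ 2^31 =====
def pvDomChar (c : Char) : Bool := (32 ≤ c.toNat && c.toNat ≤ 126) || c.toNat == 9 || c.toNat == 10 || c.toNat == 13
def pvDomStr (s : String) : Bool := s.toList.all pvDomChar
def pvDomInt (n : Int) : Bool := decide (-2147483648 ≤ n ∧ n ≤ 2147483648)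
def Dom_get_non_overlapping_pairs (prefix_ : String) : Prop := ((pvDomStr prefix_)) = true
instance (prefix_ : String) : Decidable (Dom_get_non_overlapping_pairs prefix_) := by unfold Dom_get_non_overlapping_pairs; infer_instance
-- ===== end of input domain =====

-- B replaces the pairwise intersection loops by an inverted index (dataset -> experiments)
-- and returns all pairs minus the overlapping ones (objective: alternative).

-- the hardcoded dataset_mappings (shared data of both Pythons; per-experiment sets as
-- insertion-ordered lists of their distinct elements)
def pvMappings : PySem.Dict String (PySem.Dict Int (PySem.Set String)) :=
  PySem.Dict.mk
  [("pt2", PySem.Dict.mk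
    [((1 : Int), ["distance", "trianglearea"]),
     (2, ["angle", "compass"]),
     (3, ["inside", "perimeter"]),
     (4, ["crossing", "distance"]),
     (5, ["trianglearea", "angle"]),
     (6, ["compass", "inside"]),
     (7, ["perimeter", "crossing"]),
     (8, ["distance", "angle"])]),
   ("pt3", PySem.Dict.mk
    [((1 : Int), ["distance", "trianglearea", "angle"]),
     (2, ["compass", "inside", "perimeter"]),
     (3, ["crossing", "distance", "trianglearea"]),
     (4, ["angle", "compass", "inside"]),
     (5, ["perimeter", "crossing", "distance"]),
     (6, ["trianglearea", "angle", "compass"]),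
     (7, ["inside", "perimeter", "crossing"]),
     (8, ["distance", "trianglearea", "angle"])])]

-- ===== PORT A =====
-- nested loops over i < j; datasets[i] & datasets[j]; add (i, j) when the intersection is empty
def get_non_overlapping_pairs (prefix_ : String) : List (Int × Int) :=
  match PySem.Dict.get? pvMappings prefix_ with
  | none => PySem.Set.empty
  | some datasets =>
    (PySem.List.pyRange 1 ((PySem.Dict.size datasets : Int) + 1) 1).foldl (fun acc i =>
      (PySem.List.pyRange (i + 1) ((PySem.Dict.size datasets : Int) + 1) 1).foldl (fun acc j =>
        let shared := PySem.Set.inter (PySem.Dict.getD datasets i []) (PySem.Dict.getD datasets j [])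
        if shared.isEmpty then PySem.Set.add acc (i, j) else acc) acc) PySem.Set.empty

-- ===== PORT B =====
-- inverted index: dataset name -> list of experiment numbers containing it
def pvIndex (datasets : PySem.Dict Int (PySem.Set String)) : PySem.Dict String (List Int) :=
  (PySem.Dict.items datasets).foldl (fun index p =>
    p.2.foldl (fun index name =>
      PySem.Dict.insert index name ((PySem.Dict.getD index name []) ++ [p.1])) index) PySem.Dict.empty

-- every pair of experiments sharing some dataset
def pvOverlapping (index : PySem.Dict String (List Int)) : PySem.Set (Int × Int) :=
  (PySem.Dict.values index).foldl (fun ov exps =>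
    (PySem.List.pyRange 0 (exps.length : Int) 1).foldl (fun ov a =>
      (PySem.List.pyRange (a + 1) (exps.length : Int) 1).foldl (fun ov b =>
        PySem.Set.add ov (PySem.List.pyGetD exps a 0, PySem.List.pyGetD exps b 0)) ov) ov)
    PySem.Set.empty

def get_non_overlapping_pairs_alt (prefix_ : String) : List (Int × Int) :=
  match PySem.Dict.get? pvMappings prefix_ with
  | none => PySem.Set.empty
  | some datasets =>
    let overlapping := pvOverlapping (pvIndex datasets)
    let n : Int := (PySem.Dict.size datasets : Int)
    let all_pairs : PySem.Set (Int × Int) :=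
      (PySem.List.pyRange 1 (n + 1) 1).foldl (fun s i =>
        (PySem.List.pyRange (i + 1) (n + 1) 1).foldl (fun s j =>
          PySem.Set.add s (i, j)) s) PySem.Set.empty
    PySem.Set.diff all_pairs overlapping

-- ===== PRECONDITION & SPEC =====
def Spec_get_non_overlapping_pairs (prefix_ : String) (out : List (Int × Int)) : Prop := out = get_non_overlapping_pairs_alt prefix_
instance (prefix_ : String) (out : List (Int × Int)) : Decidable (Spec_get_non_overlapping_pairs prefix_ out) := by unfold Spec_get_non_overlapping_pairs; infer_instance

-- ===== CLAIM (what is proved, stated in full; the proofs are below) =====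
def Claim_equal_get_non_overlapping_pairs : Prop := ∀ (prefix_ : String), Dom_get_non_overlapping_pairs prefix_ → Spec_get_non_overlapping_pairs prefix_ (get_non_overlapping_pairs prefix_)

-- ===== LEMMAS AND PROOFS =====
theorem pv_pt2 : get_non_overlapping_pairs "pt2" = get_non_overlapping_pairs_alt "pt2" := by decide

theorem pv_pt3 : get_non_overlapping_pairs "pt3" = get_non_overlapping_pairs_alt "pt3" := by decide

theorem pv_get?_other (p : String) (h2 : p ≠ "pt2") (h3 : p ≠ "pt3") :
    PySem.Dict.get? pvMappings p = none := by
  simp [pvMappings, Ne.symm h2, Ne.symm h3, PySem.Dict.get?]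

-- ===== VERDICT (by name: the statement is the Claim_ definition above) =====
theorem get_non_overlapping_pairs_spec : Claim_equal_get_non_overlapping_pairs := by
  intro p _
  unfold Spec_get_non_overlapping_pairs
  by_cases h2 : p = "pt2"
  · subst h2; exact pv_pt2
  · by_cases h3 : p = "pt3"
    · subst h3; exact pv_pt3
    · unfold get_non_overlapping_pairs get_non_overlapping_pairs_alt
      rw [pv_get?_other p h2 h3]
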